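-- pv_equiv track=rewrite | github.com/sriramvinn/etherum-analysis-spark | PartB/PartB_hadoop.py | reducer_join
-- ===== SOURCE A (Python) =====
-- def reducer_join(key, values):
--     is_contract = False
--     wei_received = 0
--
--     for val in values:
--         if val[0] == 0:
--             is_contract = True
--         elif val[0] == 1:
--             wei_received += int(val[1])
--
--     if is_contract:
--         yield (key, wei_received)
-- ===== SOURCE B (Python) =====
-- def reducer_join(key, values):
--     # Group the value strings by their tag into an index, then answer by lookups.
--     buckets = {}
--     for tag, s in values:
--         buckets[tag] = buckets.get(tag, []) + [s]
--     if 0 in buckets: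
--         total = 0
--         for s in buckets.get(1, []):
--             total += int(s)
--         yield (key, total)
-- ===== Notes on version B (the rewrite author's own statement) =====
-- stated objective: alternative
-- what changed: Replaces A's fused loop carrying a flag and a running sum by first building a tag-to-strings index (dict of lists) in one pass and then answering via dictionary lookups: membership of tag 0 decides emission and the sum is computed over the bucket for tag 1.
import Mathlib
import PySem

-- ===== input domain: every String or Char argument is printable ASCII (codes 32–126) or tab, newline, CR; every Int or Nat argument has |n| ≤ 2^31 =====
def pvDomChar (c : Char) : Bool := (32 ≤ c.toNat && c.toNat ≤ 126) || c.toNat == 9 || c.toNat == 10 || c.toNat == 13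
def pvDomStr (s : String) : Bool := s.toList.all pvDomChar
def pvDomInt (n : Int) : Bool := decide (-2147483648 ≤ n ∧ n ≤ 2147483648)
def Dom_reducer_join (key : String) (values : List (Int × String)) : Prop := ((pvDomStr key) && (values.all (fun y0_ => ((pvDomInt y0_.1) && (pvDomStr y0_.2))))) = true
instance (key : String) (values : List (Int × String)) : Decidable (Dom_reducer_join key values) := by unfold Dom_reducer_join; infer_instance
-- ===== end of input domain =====

-- B builds a tag -> list-of-strings index (dict of lists) in one pass and then answers by
-- lookups (membership of tag 0 decides emission; the sum runs over bucket 1); objective: alternative.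

-- ===== PORT A =====
-- single fused loop over values carrying (is_contract, wei_received); int(v[1]) via PySem.Int.ofStr?
-- (Pre_ guarantees the tag-1 strings parse, so getD 0 is never the defaulted branch inside Pre_)
def reducer_join (key : String) (values : List (Int × String)) : List (String × Int) :=
  let st := values.foldl
    (fun (s : Bool × Int) v =>
      if v.1 = 0 then (true, s.2)
      else if v.1 = 1 then (s.1, s.2 + (PySem.Int.ofStr? v.2).getD 0)
      else s)
    (false, 0)
  if st.1 then [(key, st.2)] else []

-- ===== PORT B =====
-- grouping pass: buckets[tag] = buckets.get(tag, []) + [s]; then lookups on the index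
def reducer_join_alt (key : String) (values : List (Int × String)) : List (String × Int) :=
  let buckets : PySem.Dict Int (List String) :=
    values.foldl (fun d p => d.modify p.1 [] (· ++ [p.2])) PySem.Dict.empty
  if buckets.contains 0 then
    [(key, (buckets.getD 1 []).foldl (fun t s => t + (PySem.Int.ofStr? s).getD 0) 0)]
  else []

-- ===== PRECONDITION & SPEC =====
-- Pre_ excludes inputs where a tag-1 value's string is not int()-parsable: Python A raises ValueError there.
def Pre_reducer_join (key : String) (values : List (Int × String)) : Prop :=
  ∀ v ∈ values, v.1 = 1 → (PySem.Int.ofStr? v.2).isSome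
instance (key : String) (values : List (Int × String)) : Decidable (Pre_reducer_join key values) := by unfold Pre_reducer_join; infer_instance
def pvWitness_reducer_join : String × (List (Int × String)) := ("k", [(0, ""), (1, "5")])

def Spec_reducer_join (key : String) (values : List (Int × String)) (out : List (String × Int)) : Prop := out = reducer_join_alt key values
instance (key : String) (values : List (Int × String)) (out : List (String × Int)) : Decidable (Spec_reducer_join key values out) := by unfold Spec_reducer_join; infer_instance

-- ===== CLAIM (what is proved, stated in full; the proofs are below) =====
def Claim_equal_reducer_join : Prop := ∀ (key : String) (values : List (Int × String)), Dom_reducer_join key values → Pre_reducer_join key values → Spec_reducer_join key values (reducer_join key values)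

-- ===== LEMMAS AND PROOFS =====
-- A's fused fold, characterised: flag = any tag-0, sum = sum of parsed tag-1 strings.
theorem reducer_join_fold (values : List (Int × String)) (c : Bool) (w : Int) :
    values.foldl
      (fun (s : Bool × Int) v =>
        if v.1 = 0 then (true, s.2)
        else if v.1 = 1 then (s.1, s.2 + (PySem.Int.ofStr? v.2).getD 0)
        else s)
      (c, w)
    = (c || values.any (fun v => v.1 == 0),
       w + ((values.filter (fun v => v.1 == 1)).map (fun v => (PySem.Int.ofStr? v.2).getD 0)).sum) := by
  induction values generalizing c w with
  | nil => simp
  | cons v vs ih =>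
    by_cases h0 : v.1 = 0
    · simp [h0, ih]
    · by_cases h1 : v.1 = 1
      · simp [h1, ih]; ring
      · have hb0 : (v.1 == 0) = false := by simp [h0]
        have hb1 : (v.1 == 1) = false := by simp [h1]
        simp [h0, h1, hb0, hb1, ih]

-- membership of tag 0 in the grouping index = any tag-0 element
theorem buckets_contains_zero (values : List (Int × String)) :
    (values.foldl (fun (d : PySem.Dict Int (List String)) p => d.modify p.1 [] (· ++ [p.2]))
      PySem.Dict.empty).contains 0 = values.any (fun v => v.1 == 0) := by
  induction values using List.reverseRecOn with
  | nil => simp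
  | append_singleton vs v ih =>
    simp [List.foldl_append, PySem.Dict.contains_modify, ih, Bool.or_comm, BEq.comm]

-- summing the tag-1 bucket = summing the parsed tag-1 strings
theorem sum_bucket (l : List String) (t : Int) :
    l.foldl (fun t s => t + (PySem.Int.ofStr? s).getD 0) t
      = t + (l.map (fun s => (PySem.Int.ofStr? s).getD 0)).sum := by
  induction l generalizing t with
  | nil => simp
  | cons s l ih => simp [ih]; ring

-- ===== VERDICT (by name: the statement is the Claim_ definition above) =====
theorem reducer_join_spec : Claim_equal_reducer_join := by
  intro key values _ _
  unfold Spec_reducer_join reducer_join reducer_join_alt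
  simp only [reducer_join_fold, Bool.false_or, zero_add, buckets_contains_zero,
    PySem.Dict.getD_foldl_modify_append, PySem.Dict.getD_empty, List.nil_append, sum_bucket,
    List.map_map]
  rfl
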